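-- pv_equiv track=rewrite | github.com/pypi-data/pypi-mirror-366 | packages/python-doc-formatter/python_doc_formatter-0.1.0.tar.gz/python_doc_formatter-0.1.0/pyformatter/formatters/google_docstrings.py | _extract_lists
-- ===== SOURCE A (Python) =====
-- def _extract_lists(paragraph: list[str]) -> list[list[str]]:
--     """Extract lists from the buffer.
--
--     This function splits a paragraph into alternating sections of text and list items.
--     It returns a list of sublists where each sublist contains either text lines or list
--     item lines (starting with '-').
--
--     Args:
--         paragraph (list[str]): The list of lines belonging to the paragraph.
--
--     Returns:
--         list[list[str]]: A list of sublists, alternating between text and list items.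
--     """
--     if not paragraph:
--         return []
--
--     result = []
--     current_group = []
--     is_list_item = lambda line: line.strip().startswith("-")
--     current_is_list = is_list_item(paragraph[0])
--
--     for line in paragraph:
--         line_is_list = is_list_item(line)
--
--         # If the type changes (text to list or list to text), start a new group
--         if line_is_list != current_is_list:
--             if current_group:
--                 result.append(current_group)
--             current_group = [line]
--             current_is_list = line_is_list
--         else:
--             current_group.append(line)
--
--     # Add the final group
--     if current_group:
--         result.append(current_group)
--
--     return result
-- ===== SOURCE B (Python) =====
-- def _extract_lists(paragraph: list[str]) -> list[list[str]]:
--     """Two staged passes: compute the boundary indices where the line kind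
--     flips, then slice the paragraph at those cut points."""
--     if not paragraph:
--         return []
--     keys = [line.strip().startswith("-") for line in paragraph]
--     n = len(paragraph)
--     cuts = [0] + [i for i in range(1, n) if keys[i] != keys[i - 1]] + [n]
--     return [paragraph[a:b] for a, b in zip(cuts, cuts[1:])]
-- ===== Notes on version B (the rewrite author's own statement) =====
-- stated objective: alternative
-- what changed: Replaces A's single-pass state machine (current_group/current_is_list with flush bookkeeping) by staged passes: precompute the key per line, collect the boundary indices where adjacent keys differ, then slice the paragraph at those cut points.
import Mathlib
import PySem

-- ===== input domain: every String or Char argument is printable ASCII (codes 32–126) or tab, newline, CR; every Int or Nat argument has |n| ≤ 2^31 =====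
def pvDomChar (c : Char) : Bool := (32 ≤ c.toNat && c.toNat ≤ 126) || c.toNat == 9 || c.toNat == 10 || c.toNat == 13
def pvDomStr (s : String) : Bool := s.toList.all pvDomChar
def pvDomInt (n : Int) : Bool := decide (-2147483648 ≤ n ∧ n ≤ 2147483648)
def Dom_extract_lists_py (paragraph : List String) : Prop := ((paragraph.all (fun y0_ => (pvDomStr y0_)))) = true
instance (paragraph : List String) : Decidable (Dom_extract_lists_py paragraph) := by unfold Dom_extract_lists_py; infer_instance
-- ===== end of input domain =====

-- B replaces A's single-pass state machine by staged passes: keys, boundary indices, slicing (alternative).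

-- key predicate shared by both sources: line.strip().startswith("-")
def pvIsListItem (line : String) : Bool := PySem.Str.startswith (PySem.Str.strip line) "-"

-- ===== PORT A =====
-- A's loop state: (result, current_group, current_is_list); literal transliteration of the for-loop.
def pvStepA (st : List (List String) × List String × Bool) (line : String) :
    List (List String) × List String × Bool :=
  let line_is_list := pvIsListItem line
  if line_is_list ≠ st.2.2 then
    ((if st.2.1 ≠ [] then st.1 ++ [st.2.1] else st.1), [line], line_is_list)
  else
    (st.1, st.2.1 ++ [line], st.2.2)

def extract_lists_py (paragraph : List String) : List (List String) :=
  match paragraph with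
  | [] => []
  | x :: _ =>
    let st := paragraph.foldl pvStepA ([], [], pvIsListItem x)
    if st.2.1 ≠ [] then st.1 ++ [st.2.1] else st.1

-- ===== PORT B =====
-- Python's range(1, n) for n ≥ 1 is exactly List.range' 1 (n - 1); keys[i] for 0 ≤ i < n is keys.getD i false;
-- paragraph[a:b] with 0 ≤ a ≤ b ≤ n is (paragraph.drop a).take (b - a); zip(cuts, cuts[1:]) is cuts.zip cuts.tail.
def extract_lists_py_alt (paragraph : List String) : List (List String) :=
  if paragraph = [] then []
  else
    let keys := paragraph.map pvIsListItem
    let n := paragraph.length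
    let cuts := 0 :: (((List.range' 1 (n - 1)).filter
        (fun i => keys.getD i false ≠ keys.getD (i - 1) false)) ++ [n])
    (cuts.zip cuts.tail).map (fun ab => (paragraph.drop ab.1).take (ab.2 - ab.1))

-- ===== PRECONDITION & SPEC =====
def Spec_extract_lists_py (paragraph : List String) (out : List (List String)) : Prop := out = extract_lists_py_alt paragraph
instance (paragraph : List String) (out : List (List String)) : Decidable (Spec_extract_lists_py paragraph out) := by unfold Spec_extract_lists_py; infer_instance

-- ===== CLAIM (what is proved, stated in full; the proofs are below) =====
def Claim_equal_extract_lists_py : Prop := ∀ (paragraph : List String), Dom_extract_lists_py paragraph → Spec_extract_lists_py paragraph (extract_lists_py paragraph)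

-- ===== LEMMAS AND PROOFS =====

-- proof-only intermediate characterisation: the list of maximal runs of equal key
def pvRuns (paragraph : List String) : List (List String) :=
  match paragraph with
  | [] => []
  | x :: xs =>
    (x :: xs.takeWhile (fun l => pvIsListItem l == pvIsListItem x)) ::
      pvRuns (xs.dropWhile (fun l => pvIsListItem l == pvIsListItem x))
termination_by paragraph.length
decreasing_by
  simp only [List.length_cons]
  exact Nat.lt_succ_of_le (List.length_dropWhile_le _ _)

-- A's loop, started from a nonempty current group flushed at the end, appends exactly the runs.
theorem pvFoldA_runs (lines : List String) :
    ∀ (res : List (List String)) (grp : List String) (flag : Bool), grp ≠ [] →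
    (let st := lines.foldl pvStepA (res, grp, flag)
     if st.2.1 ≠ [] then st.1 ++ [st.2.1] else st.1) =
      res ++ ((grp ++ lines.takeWhile (fun l => pvIsListItem l == flag)) ::
        pvRuns (lines.dropWhile (fun l => pvIsListItem l == flag))) := by
  induction lines with
  | nil =>
    intro res grp flag h
    simp [pvRuns, h]
  | cons l ls ih =>
    intro res grp flag h
    by_cases hk : pvIsListItem l = flag
    · have := ih res (grp ++ [l]) flag (by simp)
      simp only [List.foldl_cons, pvStepA, hk, ne_eq, not_true_eq_false, if_false,
        List.takeWhile_cons, List.dropWhile_cons, beq_self_eq_true, if_true] at this ⊢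
      rw [this]
      simp
    · have := ih (res ++ [grp]) [l] (pvIsListItem l) (by simp)
      simp only [List.foldl_cons, pvStepA, ne_eq, hk, not_false_eq_true, if_true, h,
        List.takeWhile_cons, List.dropWhile_cons] at this ⊢
      rw [this]
      have hb : (pvIsListItem l == flag) = false := by simp [hk]
      simp [hb, pvRuns]

theorem pvA_eq_runs (paragraph : List String) : extract_lists_py paragraph = pvRuns paragraph := by
  cases paragraph with
  | nil => simp [extract_lists_py, pvRuns]
  | cons x xs =>
    unfold extract_lists_py
    have := pvFoldA_runs xs [] [x] (pvIsListItem x) (by simp)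
    simp only [List.foldl_cons, pvStepA, ne_eq, not_true_eq_false, if_false, List.nil_append] at this ⊢
    rw [this]
    simp [pvRuns]


-- proof-only helper lemmas

theorem pvDropWhileHead {a : Type} (p : a -> Bool) (xs : List a) (y : a) (ys : List a)
    (h : xs.dropWhile p = y :: ys) : p y = false := by
  induction xs with
  | nil => simp [List.dropWhile] at h
  | cons b bs ih =>
    by_cases hp : p b
    · rw [List.dropWhile_cons_of_pos hp] at h; exact ih h
    · rw [List.dropWhile_cons_of_neg hp] at h
      injection h with h1 _
      subst h1; simpa using hp

theorem pvGetDLow (m : Nat) (k0 : Bool) (rest : List Bool) (j : Nat) (hj : j < m) :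
    (List.replicate m k0 ++ rest).getD j false = k0 := by
  induction m generalizing j with
  | zero => omega
  | succ m ih =>
    cases j with
    | zero => simp [List.replicate_succ]
    | succ j => simpa [List.replicate_succ] using ih j (by omega)

theorem pvGetDHigh (m : Nat) (k0 : Bool) (rest : List Bool) (j : Nat) :
    (List.replicate m k0 ++ rest).getD (m + j) false = rest.getD j false := by
  induction m with
  | zero => simp
  | succ m ih =>
    have e : m + 1 + j = (m + j) + 1 := by omega
    rw [List.replicate_succ, List.cons_append, e, List.getD_cons_succ]
    exact ih

theorem pvFilterShiftC (p q : Nat -> Bool) (m : Nat) :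
    forall (len s : Nat), (forall j, s ≤ j -> p (j + m) = q j) ->
      (List.range' (s + m) len).filter p = ((List.range' s len).filter q).map (fun j => j + m) := by
  intro len
  induction len with
  | zero => intro s _; simp
  | succ len ih =>
    intro s h
    rw [List.range'_succ, List.range'_succ, List.filter_cons, List.filter_cons]
    have e : s + m + 1 = (s + 1) + m := by omega
    rw [e, ih (s + 1) (fun j hj => h j (by omega)), h s (Nat.le_refl s)]
    by_cases hq : q s
    · simp [hq]
    · simp [hq]

theorem pvSlicesShift (pre dd : List String) (m : Nat) (hm : pre.length = m) (cs : List Nat) :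
    ((cs.map (fun j => j + m)).zip ((cs.map (fun j => j + m)).tail)).map
        (fun ab => ((pre ++ dd).drop ab.1).take (ab.2 - ab.1)) =
      (cs.zip cs.tail).map (fun ab => (dd.drop ab.1).take (ab.2 - ab.1)) := by
  rw [← List.map_tail, List.zip_map, List.map_map]
  apply List.map_congr_left
  intro ab _
  obtain ⟨a, b⟩ := ab
  simp only [Function.comp, Prod.map]
  have h1 : a + m = pre.length + a := by omega
  have h2 : b + m - (a + m) = b - a := by omega
  rw [h2, h1, List.drop_append]
  have h3 : pre.length + a - pre.length = a := by omega
  rw [h3, List.drop_eq_nil_of_le (Nat.le_add_right _ _), List.nil_append]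

-- B's port, unfolded (definitional)
theorem pvAltEq (l : List String) :
    extract_lists_py_alt l =
      if l = [] then []
      else
        ((((0 : Nat) :: (((List.range' 1 (l.length - 1)).filter
            (fun i => decide ((l.map pvIsListItem).getD i false ≠ (l.map pvIsListItem).getD (i - 1) false))) ++
          [l.length])).zip
         (((0 : Nat) :: (((List.range' 1 (l.length - 1)).filter
            (fun i => decide ((l.map pvIsListItem).getD i false ≠ (l.map pvIsListItem).getD (i - 1) false))) ++
          [l.length])).tail)).map
        (fun ab => (l.drop ab.1).take (ab.2 - ab.1))) := rfl

theorem pvAssemble (pre dd : List String) (m : Nat) (hm : pre.length = m) (bs : List Nat) :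
    ((((0 : Nat) :: ((m :: bs.map (fun j => j + m)) ++ [(pre ++ dd).length])).zip
      (((0 : Nat) :: ((m :: bs.map (fun j => j + m)) ++ [(pre ++ dd).length])).tail)).map
        (fun ab => ((pre ++ dd).drop ab.1).take (ab.2 - ab.1))) =
      pre :: ((((0 : Nat) :: (bs ++ [dd.length])).zip (((0 : Nat) :: (bs ++ [dd.length])).tail)).map
        (fun ab => (dd.drop ab.1).take (ab.2 - ab.1))) := by
  have hlen : (pre ++ dd).length = dd.length + m := by
    rw [List.length_append, hm]; omega
  rw [hlen]
  have hmcs : ((0 : Nat) :: (bs ++ [dd.length])).map (fun j => j + m) =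
      m :: (bs.map (fun j => j + m) ++ [dd.length + m]) := by simp
  have hS := pvSlicesShift pre dd m hm ((0 : Nat) :: (bs ++ [dd.length]))
  rw [hmcs] at hS
  simp only [List.tail_cons] at hS
  simp only [List.cons_append, List.tail_cons]
  rw [List.zip_cons_cons, List.map_cons, hS]
  congr 1
  simp only [List.drop_zero, Nat.sub_zero]
  rw [← hm, List.take_left]

set_option maxHeartbeats 1000000 in
theorem pvB_cons (x : String) (xs : List String) :
    extract_lists_py_alt (x :: xs) =
      (x :: xs.takeWhile (fun l => pvIsListItem l == pvIsListItem x)) ::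
        extract_lists_py_alt (xs.dropWhile (fun l => pvIsListItem l == pvIsListItem x)) := by
  have hxd : x :: xs =
      (x :: xs.takeWhile (fun l => pvIsListItem l == pvIsListItem x)) ++
        xs.dropWhile (fun l => pvIsListItem l == pvIsListItem x) := by
    simp [List.takeWhile_append_dropWhile]
  have hlenxs : (xs.takeWhile (fun l => pvIsListItem l == pvIsListItem x)).length +
      (xs.dropWhile (fun l => pvIsListItem l == pvIsListItem x)).length = xs.length := by
    have := congrArg List.length
      (List.takeWhile_append_dropWhile (p := fun l => pvIsListItem l == pvIsListItem x) (l := xs))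
    rw [List.length_append] at this
    exact this
  set k0 := pvIsListItem x with hk0
  set t := xs.takeWhile (fun l => pvIsListItem l == k0) with ht
  set d := xs.dropWhile (fun l => pvIsListItem l == k0) with hdd
  set m := t.length + 1 with hmdef
  have hpre : (x :: t).map pvIsListItem = List.replicate m k0 := by
    have hall : forall b, b ∈ (x :: t).map pvIsListItem -> b = k0 := by
      intro b hb
      rcases List.mem_map.mp hb with ⟨y, hy, rfl⟩
      rcases List.mem_cons.mp hy with rfl | hyt
      · rfl
      · have := List.mem_takeWhile_imp hyt
        simpa using this
    have := List.eq_replicate_of_mem hall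
    simpa [hmdef] using this
  have hkeys : (x :: xs).map pvIsListItem = List.replicate m k0 ++ d.map pvIsListItem := by
    rw [hxd, List.map_append, hpre]
  have hlow : forall j, j < m -> ((x :: xs).map pvIsListItem).getD j false = k0 := by
    intro j hj; rw [hkeys]; exact pvGetDLow m k0 _ j hj
  have hhigh : forall j, ((x :: xs).map pvIsListItem).getD (m + j) false =
      (d.map pvIsListItem).getD j false := by
    intro j; rw [hkeys]; exact pvGetDHigh m k0 _ j
  have hn : (x :: xs).length = m + d.length := by
    simp only [List.length_cons, hmdef]; omega
  rcases hd : d with _ | ⟨y, ys⟩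
  · -- one single run
    have htx : t = xs := by
      have h2 := hxd; rw [hd] at h2; simpa using h2.symm
    have hlm : (x :: xs).length = m := by rw [hn, hd]; simp
    have hfil : (List.range' 1 ((x :: xs).length - 1)).filter
        (fun i => decide (((x :: xs).map pvIsListItem).getD i false ≠
          ((x :: xs).map pvIsListItem).getD (i - 1) false)) = [] := by
      apply List.filter_eq_nil_iff.mpr
      intro i hi
      have hi' := List.mem_range'_1.mp hi
      have h1 : i < m := by omega
      have h2 : i - 1 < m := by omega
      rw [hlow i h1, hlow (i - 1) h2]
      simp
    rw [pvAltEq, pvAltEq]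
    rw [if_neg (show ¬(x :: xs = []) by simp), if_pos rfl, hfil]
    simp [htx]
  · -- at least two runs
    rw [hd] at hhigh
    have hpy : (pvIsListItem y == k0) = false := by
      have := pvDropWhileHead (fun l => pvIsListItem l == k0) xs y ys (by rw [← hdd, hd])
      simpa using this
    have hyne : ¬ pvIsListItem y = k0 := by simpa using hpy
    have hdlen : d.length = ys.length + 1 := by rw [hd]; simp
    have hsplit : List.range' 1 ((x :: xs).length - 1) =
        List.range' 1 (m - 1) ++ List.range' m (ys.length + 1) := by
      have e1 : (x :: xs).length - 1 = (m - 1) + (ys.length + 1) := by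
        rw [hn, hdlen]; omega
      have e2 : (1 : Nat) + (m - 1) = m := by omega
      rw [e1, ← List.range'_append_1, e2]
    have hfil1 : (List.range' 1 (m - 1)).filter
        (fun i => decide (((x :: xs).map pvIsListItem).getD i false ≠
          ((x :: xs).map pvIsListItem).getD (i - 1) false)) = [] := by
      apply List.filter_eq_nil_iff.mpr
      intro i hi
      have hi' := List.mem_range'_1.mp hi
      have h1 : i < m := by omega
      have h2 : i - 1 < m := by omega
      rw [hlow i h1, hlow (i - 1) h2]
      simp
    have hgm : ((x :: xs).map pvIsListItem).getD m false = pvIsListItem y := by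
      have h0 := hhigh 0
      rw [Nat.add_zero] at h0
      rw [h0]; simp
    have hprm : decide (((x :: xs).map pvIsListItem).getD m false ≠
        ((x :: xs).map pvIsListItem).getD (m - 1) false) = true := by
      rw [hgm, hlow (m - 1) (by omega)]
      simpa using hyne
    have hfil2 : (List.range' (m + 1) ys.length).filter
        (fun i => decide (((x :: xs).map pvIsListItem).getD i false ≠
          ((x :: xs).map pvIsListItem).getD (i - 1) false)) =
        ((List.range' 1 ys.length).filter
          (fun i => decide (((y :: ys).map pvIsListItem).getD i false ≠
            ((y :: ys).map pvIsListItem).getD (i - 1) false))).map (fun j => j + m) := by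
      have e : m + 1 = 1 + m := by omega
      rw [e]
      apply pvFilterShiftC _ _ m ys.length 1
      intro j hj
      show decide (((x :: xs).map pvIsListItem).getD (j + m) false ≠
          ((x :: xs).map pvIsListItem).getD (j + m - 1) false) = _
      have e2 : j + m - 1 = m + (j - 1) := by omega
      have e1 : j + m = m + j := by omega
      rw [e2, e1, hhigh j, hhigh (j - 1)]
    have hfull : (List.range' 1 ((x :: xs).length - 1)).filter
        (fun i => decide (((x :: xs).map pvIsListItem).getD i false ≠
          ((x :: xs).map pvIsListItem).getD (i - 1) false)) =
        m :: ((List.range' 1 ys.length).filter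
          (fun i => decide (((y :: ys).map pvIsListItem).getD i false ≠
            ((y :: ys).map pvIsListItem).getD (i - 1) false))).map (fun j => j + m) := by
      rw [hsplit, List.filter_append, hfil1, List.nil_append, List.range'_succ,
        List.filter_cons, if_pos hprm, hfil2]
    have hself : x :: xs = (x :: t) ++ (y :: ys) := by rw [hxd, hd]
    rw [pvAltEq, pvAltEq]
    rw [if_neg (show ¬(x :: xs = []) by simp), if_neg (show ¬(y :: ys = []) by simp)]
    rw [hfull]
    rw [show (y :: ys).length - 1 = ys.length from by simp]
    rw [hself]
    exact pvAssemble (x :: t) (y :: ys) m (by simp [hmdef])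
      ((List.range' 1 ys.length).filter
        (fun i => decide (((y :: ys).map pvIsListItem).getD i false ≠
          ((y :: ys).map pvIsListItem).getD (i - 1) false)))

theorem pvB_eq_runs (paragraph : List String) : extract_lists_py_alt paragraph = pvRuns paragraph := by
  induction paragraph using pvRuns.induct with
  | case1 => simp [extract_lists_py_alt, pvRuns]
  | case2 x xs ih =>
    rw [pvB_cons, ih]
    conv_rhs => rw [pvRuns]

-- ===== VERDICT (by name: the statement is the Claim_ definition above) =====
theorem extract_lists_py_spec : Claim_equal_extract_lists_py := by
  intro paragraph _
  unfold Spec_extract_lists_py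
  rw [pvA_eq_runs, pvB_eq_runs]
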